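-- pv_equiv track=rewrite | github.com/PEI-SecureLearning/core | api/src/services/pdf_to_markdown.py | _clean_page_lines
-- ===== SOURCE A (Python) =====
-- def _collapse_blank_lines(lines: list[str]) -> list[str]:
--     collapsed: list[str] = []
--     blank_streak = 0
--     for line in lines:
--         if not line.strip():
--             blank_streak += 1
--             if blank_streak <= 1:
--                 collapsed.append("")
--             continue
--         blank_streak = 0
--         collapsed.append(line)
--     return collapsed
--
-- def _clean_page_lines(
--     lines: list[str],
--     page_index: int,
--     repeated_headers: set[str],
--     repeated_footers: set[str],
-- ) -> list[str]:
--     cleaned: list[str] = []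
--     for line in lines:
--         stripped = line.strip()
--         if (
--             page_index > 0
--             and stripped
--             and (stripped in repeated_headers or stripped in repeated_footers)
--         ):
--             continue
--         cleaned.append(line)
--     return _collapse_blank_lines(cleaned)
-- ===== SOURCE B (Python) =====
-- def _clean_page_lines(
--     lines: list[str],
--     page_index: int,
--     repeated_headers: set[str],
--     repeated_footers: set[str],
-- ) -> list[str]:
--     out: list[str] = []
--     blank_streak = 0
--     for line in lines:
--         stripped = line.strip()
--         if (
--             page_index > 0
--             and stripped
--             and (stripped in repeated_headers or stripped in repeated_footers)
--         ):
--             continue  # filtered lines never touch the streak, matching the two-pass version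
--         if not stripped:
--             blank_streak += 1
--             if blank_streak <= 1:
--                 out.append("")
--         else:
--             blank_streak = 0
--             out.append(line)
--     return out
-- ===== Notes on version B (the rewrite author's own statement) =====
-- stated objective: simpler
-- what changed: Fused A's two passes (filter then collapse via the _collapse_blank_lines helper and an intermediate list) into one loop that filters and collapses blank runs with a single blank_streak counter, eliminating the helper and the intermediate list.
import Mathlib
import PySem

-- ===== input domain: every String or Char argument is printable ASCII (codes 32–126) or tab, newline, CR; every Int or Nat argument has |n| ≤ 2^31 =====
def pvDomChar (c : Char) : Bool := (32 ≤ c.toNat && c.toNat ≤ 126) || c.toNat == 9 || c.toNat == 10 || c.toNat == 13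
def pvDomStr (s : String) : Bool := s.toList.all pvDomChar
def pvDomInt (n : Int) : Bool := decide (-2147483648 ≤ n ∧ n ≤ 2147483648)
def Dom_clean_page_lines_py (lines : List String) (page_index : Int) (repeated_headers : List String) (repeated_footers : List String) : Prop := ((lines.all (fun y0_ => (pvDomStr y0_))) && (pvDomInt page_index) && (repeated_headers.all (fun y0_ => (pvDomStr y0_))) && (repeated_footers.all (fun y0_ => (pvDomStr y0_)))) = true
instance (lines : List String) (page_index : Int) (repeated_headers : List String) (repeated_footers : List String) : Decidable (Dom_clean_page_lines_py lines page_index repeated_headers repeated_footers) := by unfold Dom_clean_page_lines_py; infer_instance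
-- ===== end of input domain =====

-- B fuses A's filter pass and its _collapse_blank_lines pass into one loop (simpler; same cost).


-- ===== PORT A =====
-- should this line be skipped by A's filter loop?
def pvSkip (page_index : Int) (repeated_headers repeated_footers : List String) (line : String) : Bool :=
  let stripped := PySem.Str.strip line
  decide (page_index > 0) && !(stripped == "") &&
    (repeated_headers.contains stripped || repeated_footers.contains stripped)

-- body of the for-loop in _collapse_blank_lines: state = (collapsed, blank_streak)
def pvCollapseStep (s : List String × Int) (line : String) : List String × Int :=
  if PySem.Str.strip line == "" then
    (if s.2 + 1 ≤ 1 then s.1 ++ [""] else s.1, s.2 + 1)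
  else
    (s.1 ++ [line], 0)

def collapse_blank_lines_py (lines : List String) : List String :=
  (lines.foldl pvCollapseStep ([], 0)).1

def clean_page_lines_py (lines : List String) (page_index : Int) (repeated_headers : List String) (repeated_footers : List String) : List String :=
  let cleaned := lines.foldl
    (fun acc line =>
      if pvSkip page_index repeated_headers repeated_footers line then acc
      else acc ++ [line]) []
  collapse_blank_lines_py cleaned

-- ===== PORT B =====
-- single fused loop: state = (out, blank_streak); filtered lines leave the state untouched
def pvStepB (page_index : Int) (repeated_headers repeated_footers : List String)
    (s : List String × Int) (line : String) : List String × Int :=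
  let stripped := PySem.Str.strip line
  if pvSkip page_index repeated_headers repeated_footers line then s
  else if stripped == "" then
    (if s.2 + 1 ≤ 1 then s.1 ++ [""] else s.1, s.2 + 1)
  else
    (s.1 ++ [line], 0)

def clean_page_lines_py_alt (lines : List String) (page_index : Int) (repeated_headers : List String) (repeated_footers : List String) : List String :=
  (lines.foldl (pvStepB page_index repeated_headers repeated_footers) ([], 0)).1

-- ===== PRECONDITION & SPEC =====
def Spec_clean_page_lines_py (lines : List String) (page_index : Int) (repeated_headers : List String) (repeated_footers : List String) (out : List String) : Prop := out = clean_page_lines_py_alt lines page_index repeated_headers repeated_footers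
instance (lines : List String) (page_index : Int) (repeated_headers : List String) (repeated_footers : List String) (out : List String) : Decidable (Spec_clean_page_lines_py lines page_index repeated_headers repeated_footers out) := by unfold Spec_clean_page_lines_py; infer_instance

-- ===== CLAIM (what is proved, stated in full; the proofs are below) =====
def Claim_equal_clean_page_lines_py : Prop := ∀ (lines : List String) (page_index : Int) (repeated_headers : List String) (repeated_footers : List String), Dom_clean_page_lines_py lines page_index repeated_headers repeated_footers → Spec_clean_page_lines_py lines page_index repeated_headers repeated_footers (clean_page_lines_py lines page_index repeated_headers repeated_footers)

-- ===== LEMMAS AND PROOFS =====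

-- A's filter loop builds acc ++ (lines filtered by ¬skip)
theorem pvFilterFold (page_index : Int) (hs fs : List String) :
    ∀ (lines acc : List String),
      lines.foldl (fun acc line => if pvSkip page_index hs fs line then acc else acc ++ [line]) acc
        = acc ++ lines.filter (fun l => !pvSkip page_index hs fs l) := by
  intro lines
  induction lines with
  | nil => simp
  | cons l t ih =>
    intro acc
    by_cases h : pvSkip page_index hs fs l = true <;>
      simp [List.foldl_cons, h, ih]

-- collapsing the filtered list from any state equals B's fused fold from that state
theorem pvFused (page_index : Int) (hs fs : List String) :
    ∀ (lines : List String) (s : List String × Int),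
      (lines.filter (fun l => !pvSkip page_index hs fs l)).foldl pvCollapseStep s
        = lines.foldl (pvStepB page_index hs fs) s := by
  intro lines
  induction lines with
  | nil => intro s; rfl
  | cons l t ih =>
    intro s
    by_cases h : pvSkip page_index hs fs l = true
    · have hB : pvStepB page_index hs fs s l = s := by
        simp [pvStepB, h]
      simp [h, List.foldl_cons, hB, ih]
    · have hB : pvStepB page_index hs fs s l = pvCollapseStep s l := by
        simp [pvStepB, pvCollapseStep, h]
      simp [h, List.foldl_cons, hB, ih]

-- ===== VERDICT (by name: the statement is the Claim_ definition above) =====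
theorem clean_page_lines_py_spec : Claim_equal_clean_page_lines_py := by
  intro lines page_index hs fs _
  unfold Spec_clean_page_lines_py clean_page_lines_py clean_page_lines_py_alt
    collapse_blank_lines_py
  simp only [pvFilterFold, List.nil_append, pvFused]
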